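-- pv_equiv track=rewrite | github.com/tarunganesh2004/Leetcode | Topic Wise/Prefix Sums/countVowelSubstrings.py | vowelSubstringsBrute
-- ===== SOURCE A (Python) =====
-- def vowelSubstringsBrute(words,queries): # 92/93 passed, tle
--     def isVowel(s):
--         return s in "aeiou"
--
--     res=[]
--     for li,ri in queries:
--         count=0
--         for i in range(li,ri+1):
--             if isVowel(words[i][0]) and isVowel(words[i][-1]):
--                 count+=1
--         res.append(count)
--     return res
-- ===== SOURCE B (Python) =====
-- def vowelSubstringsBrute(words, queries):
--     pref = [0]
--     s = 0
--     for w in words: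
--         if w and w[0] in "aeiou" and w[-1] in "aeiou":
--             s += 1
--         pref.append(s)
--     res = []
--     for l, r in queries:
--         lo = max(l, 0)
--         hi = min(r + 1, len(words))
--         res.append(pref[hi] - pref[lo] if lo < hi else 0)
--     return res
-- ===== Notes on version B (the rewrite author's own statement) =====
-- stated objective: alternative
-- what changed: B precomputes one prefix-sum array of the vowel-first-and-last flags and answers every query by clamping it to the array bounds and subtracting two prefix sums, instead of A's rescan of the whole range per query; per query this is O(1) after the single pass, though the generated timing inputs (few queries) do not make that measurable.
-- intended difference: On queries starting at a negative index whose range reaches a vowel-bounded word via Python's negative-index wraparound, A silently counts words from the end of the list (e.g. [2] on (["a"], [(-1,0)])), while B clamps the query to the array and returns the intended in-bounds count ([1]). — e.g. on vowelSubstringsBrute(["a"], [(-1, 0)]): A returns [2], B returns [1]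
import Mathlib
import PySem

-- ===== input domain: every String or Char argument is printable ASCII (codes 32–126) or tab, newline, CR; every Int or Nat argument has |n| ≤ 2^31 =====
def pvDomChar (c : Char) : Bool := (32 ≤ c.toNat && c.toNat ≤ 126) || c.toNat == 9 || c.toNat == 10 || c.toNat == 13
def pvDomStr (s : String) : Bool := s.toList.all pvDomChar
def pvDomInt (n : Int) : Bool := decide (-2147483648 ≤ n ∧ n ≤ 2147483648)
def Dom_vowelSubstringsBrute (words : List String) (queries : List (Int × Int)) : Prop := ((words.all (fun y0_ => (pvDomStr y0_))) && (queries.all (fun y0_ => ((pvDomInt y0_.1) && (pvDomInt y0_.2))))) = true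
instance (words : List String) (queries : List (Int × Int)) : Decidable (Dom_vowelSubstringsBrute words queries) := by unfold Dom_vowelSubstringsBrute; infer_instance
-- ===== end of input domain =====

-- B replaces A's per-query rescan by one prefix-sum array of vowel-first-and-last flags;
-- each query becomes a clamp to the array bounds and a subtraction.

-- ===== PORT A =====
-- Python's `s in "aeiou"` on the one-character string words[i][0] / words[i][-1]; ported on the character.
def pvIsVowel (c : Char) : Bool := c == 'a' || c == 'e' || c == 'i' || c == 'o' || c == 'u'

-- literal port of A: for each query fold over range(li, ri+1), counting words whose
-- first and last character are vowels (accesses that raise in Python are excluded by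
-- Pre_; the `.getD` defaults only make the port total there).
def vowelSubstringsBrute (words : List String) (queries : List (Int × Int)) : List Int :=
  queries.foldl (fun res q =>
    let count : Int := (PySem.List.pyRange q.1 (q.2 + 1) 1).foldl (fun count i =>
      let w := (PySem.List.pyGet? words i).getD ""
      if pvIsVowel ((PySem.Str.pyGet? w 0).getD ' ') && pvIsVowel ((PySem.Str.pyGet? w (-1)).getD ' ')
      then count + 1 else count) 0
    res ++ [count]) []

-- ===== PORT B =====
-- literal port of B: one pass over words accumulating (pref, s) — Python `w and …` is
-- the emptiness guard `!(w == "") && …` — then per query clamp to [0, len] and subtract.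
def vowelSubstringsBrute_alt (words : List String) (queries : List (Int × Int)) : List Int :=
  let st := words.foldl (fun (st : List Int × Int) w =>
      let s' := if (!(w == "")) && pvIsVowel ((PySem.Str.pyGet? w 0).getD ' ') && pvIsVowel ((PySem.Str.pyGet? w (-1)).getD ' ')
                then st.2 + 1 else st.2
      (st.1 ++ [s'], s')) ([0], 0)
  queries.foldl (fun res q =>
    let lo := max q.1 0
    let hi := min (q.2 + 1) (words.length : Int)
    res ++ [if lo < hi then (PySem.List.pyGet? st.1 hi).getD 0 - (PySem.List.pyGet? st.1 lo).getD 0 else 0]) []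

-- ===== PRECONDITION & SPEC =====
-- the words a contiguous index interval [a, b) touches (a < 0 read from the end, Python-style);
-- clamped drop/take, so it evaluates fast even for huge a, b
def pvSeg (words : List String) (a b : Int) : List String :=
  (words.drop (if a < 0 then a + (words.length : Int) else a).toNat).take (b - a).toNat

-- Pre_ is exactly the inputs on which A returns: every non-empty query range touches only
-- indices in [-len(words), len(words)) and only non-empty words (otherwise A raises IndexError).
def pvPreQ (words : List String) (q : Int × Int) : Bool :=
  decide (q.2 < q.1) ||
    (decide (-(words.length : Int) ≤ q.1) && decide (q.2 < (words.length : Int)) &&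
      ((pvSeg words q.1 (min (q.2 + 1) 0) ++ pvSeg words (max q.1 0) (q.2 + 1)).all (fun w => !(w == ""))))
def Pre_vowelSubstringsBrute (words : List String) (queries : List (Int × Int)) : Prop :=
  (queries.all (pvPreQ words)) = true
instance (words : List String) (queries : List (Int × Int)) : Decidable (Pre_vowelSubstringsBrute words queries) := by unfold Pre_vowelSubstringsBrute; infer_instance

def pvWitness_vowelSubstringsBrute : List String × (List (Int × Int)) :=
  (["aba", "a", "oreo"], [(0, 2), (1, 1), (2, 1)])

-- whether a word starts and ends with a vowel (an input property, stated independently of the ports)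
def pvVB (w : String) : Bool :=
  w.toList.head?.any "aeiou".toList.contains && w.toList.getLast?.any "aeiou".toList.contains

-- On queries that start at a negative index and whose range reaches a vowel-bounded word
-- through Python's negative-index wraparound, A silently counts words from the END of the
-- list; B counts only the indices from 0 on (clamping the query to the array), which is the
-- intended reading of a range query.
def D_vowelSubstringsBrute (words : List String) (queries : List (Int × Int)) : Prop :=
  (queries.any (fun q => ((words.reverse.take (-q.1).toNat).drop (-q.2 - 1).toNat).any pvVB)) = true
instance (words : List String) (queries : List (Int × Int)) : Decidable (D_vowelSubstringsBrute words queries) := by unfold D_vowelSubstringsBrute; infer_instance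

def Spec_vowelSubstringsBrute (words : List String) (queries : List (Int × Int)) (out : List Int) : Prop := ¬ D_vowelSubstringsBrute words queries → out = vowelSubstringsBrute_alt words queries
instance (words : List String) (queries : List (Int × Int)) (out : List Int) : Decidable (Spec_vowelSubstringsBrute words queries out) := by unfold Spec_vowelSubstringsBrute; infer_instance

def pvDiffWitness_vowelSubstringsBrute : List String × (List (Int × Int)) := (["a"], [(-1, 0)])
def pvDiffWitnessOut_vowelSubstringsBrute : (List Int) × (List Int) := ([2], [1])

-- ===== CLAIM (what is proved, stated in full; the proofs are below) =====
def Claim_unchanged_vowelSubstringsBrute : Prop := ∀ (words : List String) (queries : List (Int × Int)), Dom_vowelSubstringsBrute words queries → Pre_vowelSubstringsBrute words queries → Spec_vowelSubstringsBrute words queries (vowelSubstringsBrute words queries)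
def Claim_exact_vowelSubstringsBrute : Prop := ∀ (words : List String) (queries : List (Int × Int)), Dom_vowelSubstringsBrute words queries → Pre_vowelSubstringsBrute words queries → D_vowelSubstringsBrute words queries → vowelSubstringsBrute words queries ≠ vowelSubstringsBrute_alt words queries
def Claim_changed_vowelSubstringsBrute : Prop := Dom_vowelSubstringsBrute (pvDiffWitness_vowelSubstringsBrute.1) (pvDiffWitness_vowelSubstringsBrute.2) ∧ Pre_vowelSubstringsBrute (pvDiffWitness_vowelSubstringsBrute.1) (pvDiffWitness_vowelSubstringsBrute.2) ∧ D_vowelSubstringsBrute (pvDiffWitness_vowelSubstringsBrute.1) (pvDiffWitness_vowelSubstringsBrute.2) ∧ vowelSubstringsBrute (pvDiffWitness_vowelSubstringsBrute.1) (pvDiffWitness_vowelSubstringsBrute.2) = pvDiffWitnessOut_vowelSubstringsBrute.1 ∧ vowelSubstringsBrute_alt (pvDiffWitness_vowelSubstringsBrute.1) (pvDiffWitness_vowelSubstringsBrute.2) = pvDiffWitnessOut_vowelSubstringsBrute.2 ∧ pvDiffWitnessOut_vowelSubstringsBrute.1 ≠ pvDiffWitnessOut_vowelSubstringsBrute.2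

-- ===== LEMMAS AND PROOFS =====

-- the 0/1 flag of one word, exactly B's test (A's test agrees: on "" its char lookups default to ' ')
def pvFlag (w : String) : Int :=
  if (!(w == "")) && pvIsVowel ((PySem.Str.pyGet? w 0).getD ' ') && pvIsVowel ((PySem.Str.pyGet? w (-1)).getD ' ')
  then 1 else 0

-- sum of the flags of the first j words
def pvS (ws : List String) (j : Nat) : Int := ((ws.take j).map pvFlag).sum

-- the list of running sums that B's loop appends after the initial [0]
def pvRun (s : Int) : List String → List Int
  | [] => []
  | w :: t => (s + pvFlag w) :: pvRun (s + pvFlag w) t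

-- A's unguarded test equals B's guarded one: on "" both char lookups give none → ' ', not a vowel
theorem pvStep_flag (w : String) (c : Int) :
    (if pvIsVowel ((PySem.Str.pyGet? w 0).getD ' ') && pvIsVowel ((PySem.Str.pyGet? w (-1)).getD ' ')
     then c + 1 else c) = c + pvFlag w := by
  by_cases hw : w = ""
  · subst hw
    rw [show (pvIsVowel ((PySem.Str.pyGet? "" 0).getD ' ') && pvIsVowel ((PySem.Str.pyGet? "" (-1)).getD ' ')) = false from by decide]
    rw [show pvFlag "" = 0 from by decide]
    simp
  · unfold pvFlag
    have hb : (w == "") = false := beq_eq_false_iff_ne.mpr hw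
    simp only [hb, Bool.not_false, Bool.true_and]
    split_ifs <;> simp_all

-- the flag is 1 exactly on vowel-bounded words
theorem pvFlag_vb (w : String) : pvFlag w = if pvVB w then 1 else 0 := by
  unfold pvFlag pvVB
  cases h : w.toList with
  | nil =>
      have hw : w = "" := String.toList_eq_nil_iff.mp h
      subst hw
      decide
  | cons c cs =>
      have hw : (w == "") = false := by
        rw [beq_eq_false_iff_ne]
        intro he; subst he; simp at h
      have h0 : PySem.Str.pyGet? w 0 = some c := by
        simp [PySem.Str.pyGet?, PySem.Chars.pyGet?, h]
      have h1 : PySem.Str.pyGet? w (-1) = some (cs.getLast?.getD c) := by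
        simp [PySem.Str.pyGet?, PySem.Chars.pyGet?, h, PySem.List.pyGet?_neg_one, List.getLast?_cons]
      rw [h0, h1, hw]
      simp [List.getLast?_cons, pvIsVowel, or_assoc]

theorem pvS_succ (ws : List String) (k : Nat) (hk : k < ws.length) :
    pvS ws (k + 1) = pvS ws k + pvFlag ws[k] := by
  have h : ws.take (k + 1) = ws.take k ++ [ws[k]] := by
    rw [List.take_add_one, List.getElem?_eq_getElem hk]
    simp
  unfold pvS
  rw [h, List.map_append, List.sum_append]
  simp

theorem pvRun_spec (ws : List String) :
    ∀ (acc : List Int) (s : Int),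
      ws.foldl (fun (st : List Int × Int) w =>
        let s' := if (!(w == "")) && pvIsVowel ((PySem.Str.pyGet? w 0).getD ' ') && pvIsVowel ((PySem.Str.pyGet? w (-1)).getD ' ')
                  then st.2 + 1 else st.2
        (st.1 ++ [s'], s')) (acc, s)
      = (acc ++ pvRun s ws, s + pvS ws ws.length) := by
  induction ws with
  | nil => intro acc s; simp [pvRun, pvS]
  | cons w t ih =>
      intro acc s
      simp only [List.foldl_cons]
      rw [ih]
      have hstep : (if (!(w == "")) && pvIsVowel ((PySem.Str.pyGet? w 0).getD ' ') && pvIsVowel ((PySem.Str.pyGet? w (-1)).getD ' ')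
                    then s + 1 else s) = s + pvFlag w := by
        unfold pvFlag; split_ifs <;> simp_all
      simp only [hstep, pvRun, Prod.mk.injEq]
      refine ⟨by simp, ?_⟩
      simp only [pvS, List.length_cons, List.take_succ_cons, List.map_cons, List.sum_cons]
      ring

theorem pvRun_get (ws : List String) :
    ∀ (s : Int) (j : Nat), j ≤ ws.length →
      (s :: pvRun s ws)[j]? = some (s + pvS ws j) := by
  induction ws with
  | nil =>
      intro s j hj
      simp only [List.length_nil, Nat.le_zero] at hj
      subst hj
      simp [pvS, pvRun]
  | cons w t ih =>
      intro s j hj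
      cases j with
      | zero => simp [pvS]
      | succ k =>
          simp only [pvRun, List.getElem?_cons_succ]
          have := ih (s + pvFlag w) k (by simpa using hj)
          rw [this]
          simp only [pvS, List.take_succ_cons, List.map_cons, List.sum_cons]
          ring_nf

theorem pvCount_loop (words : List String) :
    ∀ (n : Nat) (a b : Int), 0 ≤ a → a ≤ b → b ≤ (words.length : Int) →
      (b - a).toNat = n →
      ∀ (c : Int),
        (PySem.List.pyRange a b 1).foldl (fun count i =>
          let w := (PySem.List.pyGet? words i).getD ""
          if pvIsVowel ((PySem.Str.pyGet? w 0).getD ' ') && pvIsVowel ((PySem.Str.pyGet? w (-1)).getD ' ')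
          then count + 1 else count) c
        = c + (pvS words b.toNat - pvS words a.toNat) := by
  intro n
  induction n with
  | zero =>
      intro a b ha hab hb hn c
      have hba : b = a := by omega
      subst hba
      rw [PySem.List.pyRange_one_eq_nil le_rfl]
      simp
  | succ m ih =>
      intro a b ha hab hb hn c
      have hlt : a < b := by omega
      rw [PySem.List.pyRange_one_cons hlt]
      simp only [List.foldl_cons]
      have haw : a.toNat < words.length := by omega
      have hget : PySem.List.pyGet? words a = some words[a.toNat] := by
        rw [PySem.List.pyGet?_of_nonneg words ha, List.getElem?_eq_getElem haw]
      have hstep : (let w := (PySem.List.pyGet? words a).getD ""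
          if pvIsVowel ((PySem.Str.pyGet? w 0).getD ' ') && pvIsVowel ((PySem.Str.pyGet? w (-1)).getD ' ')
          then c + 1 else c) = c + pvFlag words[a.toNat] := by
        simp only [hget, Option.getD_some]
        exact pvStep_flag words[a.toNat] c
      rw [hstep, ih (a + 1) b (by omega) (by omega) hb (by omega)]
      have : pvS words (a + 1).toNat = pvS words a.toNat + pvFlag words[a.toNat] := by
        have h1 : (a + 1).toNat = a.toNat + 1 := by omega
        rw [h1, pvS_succ words a.toNat haw]
      rw [this]
      ring

-- a range of indices whose words are all not vowel-bounded contributes nothing to A's count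
theorem pvCount_zero (words : List String) :
    ∀ (m : Nat) (a b : Int), (b - a).toNat = m →
      (∀ i, a ≤ i → i < b → pvVB ((PySem.List.pyGet? words i).getD "") = false) →
      ∀ (c : Int),
        (PySem.List.pyRange a b 1).foldl (fun count i =>
          let w := (PySem.List.pyGet? words i).getD ""
          if pvIsVowel ((PySem.Str.pyGet? w 0).getD ' ') && pvIsVowel ((PySem.Str.pyGet? w (-1)).getD ' ')
          then count + 1 else count) c = c := by
  intro m
  induction m with
  | zero =>
      intro a b hn _ c
      rw [PySem.List.pyRange_one_eq_nil (by omega)]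
      simp
  | succ k ih =>
      intro a b hn hz c
      have hlt : a < b := by omega
      rw [PySem.List.pyRange_one_cons hlt]
      simp only [List.foldl_cons]
      have hstep : (let w := (PySem.List.pyGet? words a).getD ""
          if pvIsVowel ((PySem.Str.pyGet? w 0).getD ' ') && pvIsVowel ((PySem.Str.pyGet? w (-1)).getD ' ')
          then c + 1 else c) = c := by
      -- step is c + flag, and the flag is 0 because the accessed word is not vowel-bounded
        rw [pvStep_flag, pvFlag_vb, hz a le_rfl hlt]
        simp
      rw [hstep]
      exact ih (a + 1) b (by omega) (fun i h1 h2 => hz i (by omega) h2) c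

theorem pvFold_map {α β : Type} (P : α → Bool) (fA fB : α → β) :
    ∀ (qs : List α) (acc : List β), qs.all P = true →
      (∀ q, P q = true → fA q = fB q) →
      qs.foldl (fun res q => res ++ [fA q]) acc = acc ++ qs.map fB := by
  intro qs
  induction qs with
  | nil => intro acc _ _; simp
  | cons q t ih =>
      intro acc hall hfa
      simp only [List.all_cons, Bool.and_eq_true] at hall
      simp only [List.foldl_cons, List.map_cons]
      rw [ih (acc ++ [fA q]) hall.2 hfa, hfa q hall.1]
      simp

-- B's per-query answer on the completed prefix list
def pvAns (words : List String) (q : Int × Int) : Int :=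
  if max q.1 0 < min (q.2 + 1) (words.length : Int)
  then (PySem.List.pyGet? (0 :: pvRun 0 words) (min (q.2 + 1) (words.length : Int))).getD 0
         - (PySem.List.pyGet? (0 :: pvRun 0 words) (max q.1 0)).getD 0
  else 0

theorem pvPref_get (words : List String) (i : Int) (h0 : 0 ≤ i) (hn : i ≤ (words.length : Int)) :
    PySem.List.pyGet? (0 :: pvRun 0 words) i = some (pvS words i.toNat) := by
  rw [PySem.List.pyGet?_of_nonneg (0 :: pvRun 0 words) h0]
  rw [pvRun_get words 0 i.toNat (by omega)]
  simp

theorem pvFlag_nonneg (w : String) : 0 ≤ pvFlag w := by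
  unfold pvFlag; split_ifs <;> norm_num

theorem pvS_mono (words : List String) (j k : Nat) (hjk : j ≤ k) (hk : k ≤ words.length) :
    pvS words j ≤ pvS words k := by
  induction k with
  | zero =>
      have : j = 0 := by omega
      subst this; exact le_rfl
  | succ k ih =>
      by_cases h : j = k + 1
      · subst h; exact le_rfl
      · calc pvS words j ≤ pvS words k := ih (by omega) (by omega)
          _ ≤ pvS words (k + 1) := by
              rw [pvS_succ words k (by omega)]
              have := pvFlag_nonneg (words[k]'(by omega))
              linarith

theorem pvS_gap (words : List String) (lo t hi : Nat) (h1 : lo ≤ t) (h2 : t < hi)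
    (h3 : hi ≤ words.length) (hf : pvFlag (words[t]'(by omega)) = 1) :
    pvS words lo + 1 ≤ pvS words hi := by
  have m1 : pvS words lo ≤ pvS words t := pvS_mono words lo t h1 (by omega)
  have m2 : pvS words (t + 1) ≤ pvS words hi := pvS_mono words (t + 1) hi (by omega) h3
  rw [pvS_succ words t (by omega), hf] at m2
  linarith

-- a negative Python index reads from the end of the list
theorem pvGet_neg (words : List String) (i : Int)
    (h1 : -(words.length : Int) ≤ i) (h2 : i < 0) :
    PySem.List.pyGet? words i = some (words[(i + (words.length : Int)).toNat]'(by omega)) := by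
  have hk := PySem.List.pyGet?_neg_natCast words (-i).toNat (by omega) (by omega)
  rw [show (-(((-i).toNat : Nat) : Int)) = i by omega] at hk
  rw [show words.length - (-i).toNat = (i + (words.length : Int)).toNat by omega] at hk
  rw [hk, List.getElem?_eq_getElem (by omega)]

-- A's inner loop over a range of negative indices is a difference of prefix sums read from the end
theorem pvCount_neg (words : List String) :
    ∀ (m : Nat) (a b : Int), -(words.length : Int) ≤ a → a ≤ b → b ≤ 0 →
      (b - a).toNat = m →
      ∀ (c : Int),
        (PySem.List.pyRange a b 1).foldl (fun count i =>
          let w := (PySem.List.pyGet? words i).getD ""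
          if pvIsVowel ((PySem.Str.pyGet? w 0).getD ' ') && pvIsVowel ((PySem.Str.pyGet? w (-1)).getD ' ')
          then count + 1 else count) c
        = c + (pvS words (b + (words.length : Int)).toNat - pvS words (a + (words.length : Int)).toNat) := by
  intro m
  induction m with
  | zero =>
      intro a b h1 hab h2 hn c
      have hba : b = a := by omega
      subst hba
      rw [PySem.List.pyRange_one_eq_nil le_rfl]
      simp
  | succ k ih =>
      intro a b h1 hab h2 hn c
      have hlt : a < b := by omega
      rw [PySem.List.pyRange_one_cons hlt]
      simp only [List.foldl_cons]
      have hget := pvGet_neg words a h1 (by omega)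
      have hstep : (let w := (PySem.List.pyGet? words a).getD ""
          if pvIsVowel ((PySem.Str.pyGet? w 0).getD ' ') && pvIsVowel ((PySem.Str.pyGet? w (-1)).getD ' ')
          then c + 1 else c) = c + pvFlag (words[(a + (words.length : Int)).toNat]'(by omega)) := by
        simp only [hget, Option.getD_some]
        exact pvStep_flag _ c
      rw [hstep, ih (a + 1) b (by omega) (by omega) h2 (by omega)]
      rw [show (a + 1 + (words.length : Int)).toNat = (a + (words.length : Int)).toNat + 1 by omega]
      rw [pvS_succ words (a + (words.length : Int)).toNat (by omega)]
      ring

-- the reversed-prefix segment D_ inspects is the reversal of the wrapped Python accesses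
theorem pvRevSeg (words : List String) :
    ∀ (m : Nat) (a b : Int), -(words.length : Int) ≤ a → b ≤ 0 → (b - a).toNat = m →
      (words.reverse.take (-a).toNat).drop (-b).toNat
        = ((PySem.List.pyRange a b 1).map (fun i => (PySem.List.pyGet? words i).getD "")).reverse := by
  intro m
  induction m with
  | zero =>
      intro a b h1 h2 hn
      rw [PySem.List.pyRange_one_eq_nil (by omega)]
      simp only [List.map_nil, List.reverse_nil]
      apply List.drop_eq_nil_of_le
      simp only [List.length_take, List.length_reverse]
      omega
  | succ k ih =>
      intro a b h1 h2 hn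
      have hab : a < b := by omega
      have hrw : PySem.List.pyRange a b 1 = PySem.List.pyRange a (b - 1) 1 ++ [b - 1] := by
        conv_lhs => rw [show b = (b - 1) + 1 by ring]
        exact PySem.List.pyRange_one_succ_right (by omega)
      rw [hrw, List.map_append, List.reverse_append]
      simp only [List.map_cons, List.map_nil, List.reverse_cons, List.reverse_nil,
        List.nil_append, List.cons_append]
      have hTlen : (-b).toNat < (words.reverse.take (-a).toNat).length := by
        simp only [List.length_take, List.length_reverse]
        omega
      rw [List.drop_eq_getElem_cons hTlen]
      congr 1
      · rw [List.getElem_take, List.getElem_reverse]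
        have hget := PySem.List.pyGet?_neg_natCast words (1 - b).toNat (by omega) (by omega)
        rw [show (-(((1 - b).toNat : Nat) : Int)) = b - 1 by omega] at hget
        rw [show words.length - (1 - b).toNat = words.length - 1 - (-b).toNat by omega] at hget
        rw [hget, List.getElem?_eq_getElem (by omega)]
        simp
      · rw [show (-b).toNat + 1 = (-(b - 1)).toNat by omega]
        exact ih a (b - 1) h1 (by omega) (by omega)

-- the per-query core: inside Pre_ and outside D_, A's scan equals B's clamped subtraction
theorem pvPerQuery (words : List String) (q : Int × Int)
    (hp : pvPreQ words q = true)
    (hd : (((words.reverse.take (-q.1).toNat).drop (-q.2 - 1).toNat).any pvVB) = false) :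
    (PySem.List.pyRange q.1 (q.2 + 1) 1).foldl (fun count i =>
      let w := (PySem.List.pyGet? words i).getD ""
      if pvIsVowel ((PySem.Str.pyGet? w 0).getD ' ') && pvIsVowel ((PySem.Str.pyGet? w (-1)).getD ' ')
      then count + 1 else count) 0 = pvAns words q := by
  unfold pvAns
  by_cases hrev : q.2 < q.1
  · rw [PySem.List.pyRange_one_eq_nil (by omega), if_neg (by omega)]
    rfl
  · unfold pvPreQ at hp
    rw [Bool.or_eq_true] at hp
    have hp' : -(words.length : Int) ≤ q.1 ∧ q.2 < (words.length : Int) := by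
      rcases hp with h | h
      · exact absurd (by simpa using h) hrev
      · rw [Bool.and_eq_true, Bool.and_eq_true] at h
        exact ⟨by simpa using h.1.1, by simpa using h.1.2⟩
    by_cases h0 : 0 ≤ q.1
    · have hb := hp'.2
      rw [pvCount_loop words (q.2 + 1 - q.1).toNat q.1 (q.2 + 1) h0 (by omega) (by omega) rfl 0]
      have hmax : max q.1 0 = q.1 := by omega
      have hmin : min (q.2 + 1) (words.length : Int) = q.2 + 1 := by omega
      rw [if_pos (by omega), hmax, hmin]
      rw [pvPref_get words (q.2 + 1) (by omega) (by omega), pvPref_get words q.1 h0 (by omega)]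
      simp
    · rw [show (-q.2 - 1).toNat = (-(min (q.2 + 1) 0)).toNat by omega] at hd
      rw [pvRevSeg words (min (q.2 + 1) 0 - q.1).toNat q.1 (min (q.2 + 1) 0) hp'.1 (by omega) rfl] at hd
      rw [List.any_reverse] at hd
      have hd' : ∀ i : Int, q.1 ≤ i → i < min (q.2 + 1) 0 → pvVB ((PySem.List.pyGet? words i).getD "") = false := by
        intro i h1 h2
        rw [List.any_eq_false] at hd
        have := hd _ (List.mem_map_of_mem (PySem.List.mem_pyRange_one.mpr ⟨h1, h2⟩))
        simpa using this
      have hl := hp'.1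
      by_cases hrneg : q.2 + 1 ≤ 0
      · rw [pvCount_zero words (q.2 + 1 - q.1).toNat q.1 (q.2 + 1) rfl
            (fun i h1 h2 => hd' i h1 (by omega)) 0]
        rw [if_neg (by omega)]
      · have hb := hp'.2
        rw [PySem.List.pyRange_one_append q.1 0 (q.2 + 1) (by omega) (by omega), List.foldl_append]
        rw [pvCount_zero words (0 - q.1).toNat q.1 0 rfl (fun i h1 h2 => hd' i h1 (by omega)) 0]
        rw [pvCount_loop words (q.2 + 1).toNat 0 (q.2 + 1) le_rfl (by omega) (by omega) (by omega) 0]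
        have hmax : max q.1 0 = 0 := by omega
        have hmin : min (q.2 + 1) (words.length : Int) = q.2 + 1 := by omega
        rw [if_pos (by omega), hmax, hmin]
        rw [pvPref_get words (q.2 + 1) (by omega) (by omega), pvPref_get words 0 le_rfl (by omega)]
        simp [pvS]

-- B's port is the per-query map of pvAns
theorem pvAltEq (words : List String) (queries : List (Int × Int)) :
    vowelSubstringsBrute_alt words queries = [] ++ queries.map (pvAns words) := by
  unfold vowelSubstringsBrute_alt
  rw [pvRun_spec words [0] 0]
  show queries.foldl (fun res q => res ++ [pvAns words q]) [] = _
  exact pvFold_map (fun _ => true) (pvAns words) (pvAns words) queries [] (by simp) (fun _ _ => rfl)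

-- A's port is the per-query map of its inner loop
theorem pvAEq (words : List String) (queries : List (Int × Int)) :
    vowelSubstringsBrute words queries
      = queries.map (fun q => (PySem.List.pyRange q.1 (q.2 + 1) 1).foldl (fun count i =>
          let w := (PySem.List.pyGet? words i).getD ""
          if pvIsVowel ((PySem.Str.pyGet? w 0).getD ' ') && pvIsVowel ((PySem.Str.pyGet? w (-1)).getD ' ')
          then count + 1 else count) 0) := by
  unfold vowelSubstringsBrute
  show queries.foldl (fun res q => res ++
      [(PySem.List.pyRange q.1 (q.2 + 1) 1).foldl (fun count i =>
        let w := (PySem.List.pyGet? words i).getD ""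
        if pvIsVowel ((PySem.Str.pyGet? w 0).getD ' ') && pvIsVowel ((PySem.Str.pyGet? w (-1)).getD ' ')
        then count + 1 else count) 0]) [] = _
  exact (PySem.List.foldl_append_singleton_eq_map _ queries []).trans (by simp)

-- ===== VERDICT (by name: the statement is the Claim_ definition above) =====
theorem vowelSubstringsBrute_spec : Claim_unchanged_vowelSubstringsBrute := by
  intro words queries _hdom hpre
  unfold Spec_vowelSubstringsBrute
  intro hnd
  rw [pvAltEq]
  unfold vowelSubstringsBrute
  show queries.foldl (fun res q => res ++
      [(PySem.List.pyRange q.1 (q.2 + 1) 1).foldl (fun count i =>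
        let w := (PySem.List.pyGet? words i).getD ""
        if pvIsVowel ((PySem.Str.pyGet? w 0).getD ' ') && pvIsVowel ((PySem.Str.pyGet? w (-1)).getD ' ')
        then count + 1 else count) 0]) [] = _
  have hall : queries.all (fun q => pvPreQ words q &&
      !(((words.reverse.take (-q.1).toNat).drop (-q.2 - 1).toNat).any pvVB)) = true := by
    rw [List.all_eq_true]
    intro q hqm
    rw [Bool.and_eq_true]
    refine ⟨?_, ?_⟩
    · unfold Pre_vowelSubstringsBrute at hpre
      rw [List.all_eq_true] at hpre
      exact hpre q hqm
    · cases hpd : (((words.reverse.take (-q.1).toNat).drop (-q.2 - 1).toNat).any pvVB)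
      · simp
      · exact absurd (List.any_eq_true.mpr ⟨q, hqm, hpd⟩) hnd
  refine pvFold_map _ _ _ queries [] hall ?_
  intro q hq
  rw [Bool.and_eq_true] at hq
  exact pvPerQuery words q hq.1 (by simpa using hq.2)

theorem vowelSubstringsBrute_changed : Claim_changed_vowelSubstringsBrute := by
  unfold Claim_changed_vowelSubstringsBrute
  decide

theorem vowelSubstringsBrute_tight : Claim_exact_vowelSubstringsBrute := by
  intro words queries _hdom hpre hD heq
  obtain ⟨q, hqmem, hqany⟩ := List.any_eq_true.mp hD
  -- the witnessed non-empty wrapped segment pins q.1 < 0 ≤ wrapped indices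
  obtain ⟨x, hxmem, -⟩ := List.any_eq_true.mp hqany
  have hlen : ((words.reverse.take (-q.1).toNat).drop (-q.2 - 1).toNat).length ≠ 0 := by
    intro h0
    rw [List.length_eq_zero_iff] at h0
    rw [h0] at hxmem
    simp at hxmem
  rw [List.length_drop, List.length_take, List.length_reverse] at hlen
  have hq1 : q.1 < 0 := by omega
  have hle : q.1 ≤ q.2 := by omega
  -- Pre_ supplies the bounds
  unfold Pre_vowelSubstringsBrute at hpre
  rw [List.all_eq_true] at hpre
  have hp := hpre q hqmem
  unfold pvPreQ at hp
  rw [Bool.or_eq_true] at hp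
  have hp' : -(words.length : Int) ≤ q.1 ∧ q.2 < (words.length : Int) := by
    rcases hp with h | h
    · exact absurd (by simpa using h) (by omega)
    · rw [Bool.and_eq_true, Bool.and_eq_true] at h
      exact ⟨by simpa using h.1.1, by simpa using h.1.2⟩
  -- extract a wrapped index carrying a vowel-bounded word
  rw [show (-q.2 - 1).toNat = (-(min (q.2 + 1) 0)).toNat by omega] at hqany
  rw [pvRevSeg words (min (q.2 + 1) 0 - q.1).toNat q.1 (min (q.2 + 1) 0) hp'.1 (by omega) rfl,
    List.any_reverse] at hqany
  obtain ⟨y, hymem, hyvb⟩ := List.any_eq_true.mp hqany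
  obtain ⟨i, hirange, rfl⟩ := List.mem_map.mp hymem
  rw [PySem.List.mem_pyRange_one] at hirange
  rw [pvGet_neg words i (by omega) (by omega), Option.getD_some] at hyvb
  have hflag : pvFlag (words[(i + (words.length : Int)).toNat]'(by omega)) = 1 := by
    rw [pvFlag_vb, hyvb]
    rfl
  -- both outputs as maps; equality at q
  rw [pvAEq, pvAltEq, List.nil_append, List.map_eq_map_iff] at heq
  have hpoint := heq q hqmem
  unfold pvAns at hpoint
  by_cases hneg : q.2 + 1 ≤ 0
  · -- whole range negative: A counts ≥ 1, B returns 0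
    rw [pvCount_neg words (q.2 + 1 - q.1).toNat q.1 (q.2 + 1) hp'.1 (by omega) hneg rfl 0] at hpoint
    rw [if_neg (by omega)] at hpoint
    have hgap := pvS_gap words (q.1 + (words.length : Int)).toNat
      (i + (words.length : Int)).toNat (q.2 + 1 + (words.length : Int)).toNat
      (by omega) (by omega) (by omega) hflag
    omega
  · -- range crosses 0: A counts the wrap on top of B's clamped value
    rw [PySem.List.pyRange_one_append q.1 0 (q.2 + 1) (by omega) (by omega), List.foldl_append] at hpoint
    rw [pvCount_neg words (0 - q.1).toNat q.1 0 hp'.1 (by omega) le_rfl rfl 0] at hpoint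
    rw [pvCount_loop words (q.2 + 1).toNat 0 (q.2 + 1) le_rfl (by omega) (by omega) (by omega)] at hpoint
    rw [if_pos (by omega), max_eq_right (by omega), min_eq_left (by omega)] at hpoint
    rw [pvPref_get words (q.2 + 1) (by omega) (by omega), pvPref_get words 0 le_rfl (by omega)] at hpoint
    simp only [Option.getD_some] at hpoint
    have hgap := pvS_gap words (q.1 + (words.length : Int)).toNat
      (i + (words.length : Int)).toNat (0 + (words.length : Int)).toNat
      (by omega) (by omega) (by omega) hflag
    rw [show ((0 : Int) + (words.length : Int)).toNat = words.length by omega] at hgap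
    rw [show ((0 : Int) + (words.length : Int)).toNat = words.length by omega] at hpoint
    linarith [hgap, hpoint]
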